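-- pv_equiv track=rewrite | github.com/venura449/RewriteGithub | auto_commit.py | slugify_branch_part
-- ===== SOURCE A (Python) =====
-- def slugify_branch_part(value: str) -> str:
--     """Convert a string into a Git branch-friendly slug."""
--     safe = []
--     for ch in value.lower():
--         if ch.isalnum():
--             safe.append(ch)
--         elif safe and safe[-1] != "-":
--             safe.append("-")
--     slug = "".join(safe).strip("-")
--     return slug or "branch"
-- ===== SOURCE B (Python) =====
-- def slugify_branch_part(value: str) -> str:
--     """Convert a string into a Git branch-friendly slug."""
--     interm = "".join(ch if ch.isalnum() else "-" for ch in value.lower())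
--     return "-".join(p for p in interm.split("-") if p) or "branch"
-- ===== Notes on version B (the rewrite author's own statement) =====
-- stated objective: simpler
-- what changed: Replaced the stateful look-at-last-appended-char loop by a two-phase generate-then-collapse: map every non-alphanumeric char to '-', then split on '-' and join the nonempty pieces.
import Mathlib
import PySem

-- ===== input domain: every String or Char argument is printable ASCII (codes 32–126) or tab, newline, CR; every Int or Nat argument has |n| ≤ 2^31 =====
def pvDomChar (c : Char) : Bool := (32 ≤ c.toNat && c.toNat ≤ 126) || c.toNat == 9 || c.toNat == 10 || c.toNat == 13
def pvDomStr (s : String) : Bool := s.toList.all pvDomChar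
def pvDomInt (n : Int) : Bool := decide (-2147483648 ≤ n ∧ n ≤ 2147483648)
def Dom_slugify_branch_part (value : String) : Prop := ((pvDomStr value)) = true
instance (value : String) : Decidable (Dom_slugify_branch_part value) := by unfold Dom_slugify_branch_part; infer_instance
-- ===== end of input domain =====

-- B replaces A's stateful look-at-last-appended-char loop by a two-phase generate-then-collapse
-- (map non-alphanumerics to '-', split on '-', join the nonempty pieces): simpler, same O(n) cost.

-- ===== PORT A =====
-- 'safe and safe[-1] != "-"' is ported as '!acc.isEmpty && acc.getLast? != some '-''
-- (safe[-1] on a nonempty list is its last element).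
def slugify_branch_part (value : String) : String :=
  let safe := (PySem.Str.lower value).toList.foldl
    (fun acc ch =>
      if PySem.Chars.isalnum ch then acc ++ [ch]
      else if !acc.isEmpty && acc.getLast? != some '-' then acc ++ ['-'] else acc) []
  let slug := PySem.Chars.stripChars safe ['-']
  if slug.isEmpty then "branch" else String.ofList slug

-- ===== PORT B =====
-- interm is a string of single chars, built directly as a List Char; str.split('-') is List.splitOn '-'.
def slugify_branch_part_alt (value : String) : String :=
  let interm := (PySem.Str.lower value).toList.map
    (fun ch => if PySem.Chars.isalnum ch then ch else '-')
  let slug := PySem.Chars.join ['-'] ((interm.splitOn '-').filter (fun p => !p.isEmpty))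
  if slug.isEmpty then "branch" else String.ofList slug

-- ===== PRECONDITION & SPEC =====
def Spec_slugify_branch_part (value : String) (out : String) : Prop := out = slugify_branch_part_alt value
instance (value : String) (out : String) : Decidable (Spec_slugify_branch_part value out) := by unfold Spec_slugify_branch_part; infer_instance

-- ===== CLAIM (what is proved, stated in full; the proofs are below) =====
def Claim_equal_slugify_branch_part : Prop := ∀ (value : String), Dom_slugify_branch_part value → Spec_slugify_branch_part value (slugify_branch_part value)

-- ===== LEMMAS AND PROOFS =====

-- A's loop state, abstracted: s = "some char was appended", d = "the last appended char is '-'".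
def pvF : Bool → Bool → List Char → List Char
  | _, _, [] => []
  | s, d, c :: cs =>
    if PySem.Chars.isalnum c then c :: pvF true false cs
    else if s && !d then '-' :: pvF true true cs
    else pvF s d cs

-- the maximal alphanumeric runs of a list
def pvWords : List Char → List (List Char)
  | [] => []
  | c :: cs =>
    if PySem.Chars.isalnum c then
      (c :: cs.takeWhile PySem.Chars.isalnum) :: pvWords (cs.dropWhile PySem.Chars.isalnum)
    else pvWords cs
termination_by l => l.length
decreasing_by
  · exact Nat.lt_succ_of_le (List.length_dropWhile_le _ _)
  · exact Nat.lt_succ_self _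

-- the trailing '-' that A's loop leaves pending
def pvTd (L : List Char) : List Char :=
  if pvWords L = [] then []
  else if L.getLast?.all PySem.Chars.isalnum then [] else ['-']

theorem pv_alnum_ne {c : Char} (h : PySem.Chars.isalnum c = true) : (c == '-') = false := by
  by_cases hc : c = '-'
  · subst hc; exact absurd h (by decide)
  · simpa using hc

theorem pv_dropWhile_head {p : Char → Bool} {l r' : List Char} {d : Char}
    (h : l.dropWhile p = d :: r') : p d = false := by
  induction l with
  | nil => simp at h
  | cons x xs ih =>
    rw [List.dropWhile_cons] at h
    split at h
    · exact ih h
    · next hx => cases h; simpa using hx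

theorem pv_fold_eq (L : List Char) : ∀ acc : List Char,
    L.foldl (fun acc ch =>
      if PySem.Chars.isalnum ch then acc ++ [ch]
      else if !acc.isEmpty && acc.getLast? != some '-' then acc ++ ['-'] else acc) acc
    = acc ++ pvF (!acc.isEmpty) (acc.getLast? == some '-') L := by
  induction L with
  | nil => intro acc; simp [pvF]
  | cons c cs ih =>
    intro acc
    rw [List.foldl_cons]
    by_cases h : PySem.Chars.isalnum c = true
    · rw [if_pos h, ih (acc ++ [c])]
      rw [show (acc ++ [c]).isEmpty = false by simp,
          show (acc ++ [c]).getLast? = some c from List.getLast?_concat,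
          show ((some c == some '-') : Bool) = false by simp [pv_alnum_ne h],
          show pvF (!acc.isEmpty) (acc.getLast? == some '-') (c :: cs)
            = c :: pvF true false cs by simp [pvF, h]]
      simp
    · rw [if_neg (by simp [h])]
      by_cases hg : (!acc.isEmpty && acc.getLast? != some '-') = true
      · rw [if_pos hg, ih (acc ++ ['-'])]
        have hs : (!acc.isEmpty && !(acc.getLast? == some '-')) = true := by
          simpa [bne] using hg
        rw [show (acc ++ ['-']).isEmpty = false by simp,
            show (acc ++ ['-']).getLast? = some '-' from List.getLast?_concat,
            show pvF (!acc.isEmpty) (acc.getLast? == some '-') (c :: cs)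
              = '-' :: pvF true true cs by simp [pvF, h, hs]]
        simp
      · rw [if_neg hg, ih acc]
        have hs : (!acc.isEmpty && !(acc.getLast? == some '-')) = false := by
          simpa [bne] using hg
        rw [show pvF (!acc.isEmpty) (acc.getLast? == some '-') (c :: cs)
              = pvF (!acc.isEmpty) (acc.getLast? == some '-') cs by simp [pvF, h, hs]]

theorem pvF_tt_eq_ff : ∀ L : List Char, pvF true true L = pvF false false L := by
  intro L
  induction L with
  | nil => rfl
  | cons c cs ih => by_cases h : PySem.Chars.isalnum c = true <;> simp [pvF, h, ih]

theorem pvF_tf (L : List Char) :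
    pvF true false L = L.takeWhile PySem.Chars.isalnum ++
      (match L.dropWhile PySem.Chars.isalnum with
       | [] => []
       | _ :: r => '-' :: pvF false false r) := by
  induction L with
  | nil => rfl
  | cons c cs ih =>
    by_cases h : PySem.Chars.isalnum c = true
    · simp [pvF, h, ih]
    · simp [pvF, h, pvF_tt_eq_ff]

theorem pvWords_mem (L : List Char) :
    ∀ w ∈ pvWords L, w ≠ [] ∧ ∀ ch ∈ w, PySem.Chars.isalnum ch = true := by
  induction L using pvWords.induct with
  | case1 => simp [pvWords]
  | case2 c cs h ih =>
    rw [pvWords, if_pos h]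
    intro w hw
    rcases List.mem_cons.mp hw with rfl | hw'
    · refine ⟨by simp, ?_⟩
      intro ch hch
      rcases List.mem_cons.mp hch with rfl | hch'
      · exact h
      · exact List.mem_takeWhile_imp hch'
    · exact ih w hw'
  | case3 c cs h ih => rw [pvWords, if_neg h]; exact ih

theorem pvWords_nil_all (L : List Char) (h : pvWords L = []) :
    ∀ c ∈ L, PySem.Chars.isalnum c = false := by
  induction L using pvWords.induct with
  | case1 => simp
  | case2 c cs hc ih => rw [pvWords, if_pos hc] at h; simp at h
  | case3 c cs hc ih =>
    rw [pvWords, if_neg hc] at h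
    intro x hx
    rcases List.mem_cons.mp hx with rfl | hx'
    · simpa using hc
    · exact ih h x hx'

theorem pv_getLast?_tail_append {c : Char} {t r : List Char} (hr : r ≠ []) :
    (c :: (t ++ r)).getLast? = r.getLast? := by
  have : c :: (t ++ r) = (c :: t) ++ r := by simp
  rw [this, List.getLast?_append]
  cases hg : r.getLast? with
  | some x => simp
  | none => exact absurd (List.getLast?_eq_none_iff.mp hg) hr

theorem pvF_ff_eq (L : List Char) :
    pvF false false L = List.intercalate ['-'] (pvWords L) ++ pvTd L := by
  induction L using pvWords.induct with
  | case1 => simp [pvF, pvWords, pvTd, List.intercalate]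
  | case2 c cs h ih =>
    have hsplit : cs.takeWhile PySem.Chars.isalnum ++ cs.dropWhile PySem.Chars.isalnum = cs :=
      List.takeWhile_append_dropWhile
    rw [show pvF false false (c :: cs) = c :: pvF true false cs by simp [pvF, h], pvF_tf cs]
    rw [show pvWords (c :: cs) = (c :: cs.takeWhile PySem.Chars.isalnum) ::
          pvWords (cs.dropWhile PySem.Chars.isalnum) by rw [pvWords, if_pos h]]
    cases hr : cs.dropWhile PySem.Chars.isalnum with
    | nil =>
      -- no char after the first run: no separator, no trailing dash
      have hcs : cs.takeWhile PySem.Chars.isalnum = cs := by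
        rw [hr, List.append_nil] at hsplit; exact hsplit
      have hlast : pvTd (c :: cs) = [] := by
        unfold pvTd
        rw [if_neg (by rw [pvWords, if_pos h]; simp)]
        rw [if_pos ?_]
        cases hg : (c :: cs).getLast? with
        | none => rfl
        | some x =>
          have hx : x ∈ c :: cs := List.mem_of_getLast? hg
          simp only [Option.all_some]
          rcases List.mem_cons.mp hx with rfl | hx'
          · exact h
          · exact List.mem_takeWhile_imp (by rw [hcs]; exact hx')
      rw [hlast]
      simp [pvWords, List.intercalate, hcs]
    | cons d r' =>
      have hd : PySem.Chars.isalnum d = false := by simpa using pv_dropWhile_head hr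
      have ihr : pvF false false r' =
          List.intercalate ['-'] (pvWords (d :: r')) ++ pvTd (d :: r') := by
        have := ih; rw [hr] at this
        rwa [show pvF false false (d :: r') = pvF false false r' by simp [pvF, hd]] at this
      have hlast2 : (c :: cs).getLast? = (d :: r').getLast? := by
        rw [← hsplit, hr]; exact pv_getLast?_tail_append (by simp)
      cases hw : pvWords (d :: r') with
      | nil =>
        -- everything after the first run is non-alphanumeric: a single pending dash
        have hall := pvWords_nil_all _ hw
        have htd : pvTd (d :: r') = [] := by unfold pvTd; rw [if_pos hw]
        rw [hw, htd, List.append_nil] at ihr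
        have htdc : pvTd (c :: cs) = ['-'] := by
          unfold pvTd
          rw [if_neg (show ¬pvWords (c :: cs) = [] by
                rw [pvWords, if_pos h, hr, hw]; simp), hlast2]
          cases hg : (d :: r').getLast? with
          | none => simp at hg
          | some x => simp [hall x (List.mem_of_getLast? hg)]
        have hm : (match (d :: r' : List Char) with
          | [] => ([] : List Char)
          | _ :: r => '-' :: pvF false false r) = '-' :: pvF false false r' := rfl
        rw [htdc, hm, ihr]
        simp [List.intercalate]
      | cons w ws =>
        have htd : pvTd (c :: cs) = pvTd (d :: r') := by
          unfold pvTd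
          rw [hlast2, if_neg (show ¬pvWords (c :: cs) = [] by rw [pvWords, if_pos h]; simp),
              if_neg (show ¬pvWords (d :: r') = [] by rw [hw]; simp)]
        have hm : (match (d :: r' : List Char) with
          | [] => ([] : List Char)
          | _ :: r => '-' :: pvF false false r) = '-' :: pvF false false r' := rfl
        rw [htd, hm, ihr, hw]
        simp [List.intercalate, List.intersperse]
  | case3 c cs h ih =>
    rw [show pvF false false (c :: cs) = pvF false false cs by simp [pvF, h],
        show pvWords (c :: cs) = pvWords cs by rw [pvWords, if_neg h], ih]
    congr 1
    unfold pvTd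
    cases cs with
    | nil => simp [pvWords, h]
    | cons x xs =>
      rw [List.getLast?_cons_cons,
          show pvWords (c :: x :: xs) = pvWords (x :: xs) from by rw [pvWords, if_neg h]]

theorem pv_split_head (L : List Char) :
    List.splitOnP (fun c => !PySem.Chars.isalnum c) L =
      (match L.dropWhile PySem.Chars.isalnum with
       | [] => [L.takeWhile PySem.Chars.isalnum]
       | _ :: r => L.takeWhile PySem.Chars.isalnum ::
           List.splitOnP (fun c => !PySem.Chars.isalnum c) r) := by
  induction L with
  | nil => simp [List.splitOnP_nil]
  | cons c cs ih =>
    by_cases h : PySem.Chars.isalnum c = true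
    · rw [List.splitOnP_cons, if_neg (by simp [h]), ih,
          List.takeWhile_cons, List.dropWhile_cons, if_pos h, if_pos h]
      cases cs.dropWhile PySem.Chars.isalnum <;> simp
    · rw [List.splitOnP_cons, if_pos (by simp [h]),
          List.takeWhile_cons, List.dropWhile_cons, if_neg h, if_neg h]

theorem pv_map_split (L : List Char) :
    List.splitOnP (· == '-') (L.map (fun ch => if PySem.Chars.isalnum ch then ch else '-')) =
      List.splitOnP (fun c => !PySem.Chars.isalnum c) L := by
  induction L with
  | nil => simp
  | cons c cs ih =>
    by_cases h : PySem.Chars.isalnum c = true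
    · rw [List.map_cons, if_pos h, List.splitOnP_cons, List.splitOnP_cons,
          if_neg (by simp [pv_alnum_ne h]), if_neg (by simp [h]), ih]
    · rw [List.map_cons, if_neg h, List.splitOnP_cons, List.splitOnP_cons,
          if_pos (by simp), if_pos (by simp [h]), ih]

theorem pv_filter_split (L : List Char) :
    (List.splitOnP (fun c => !PySem.Chars.isalnum c) L).filter (fun p => !p.isEmpty) =
      pvWords L := by
  induction L using pvWords.induct with
  | case1 => simp [List.splitOnP_nil, pvWords]
  | case2 c cs h ih =>
    rw [pv_split_head, List.takeWhile_cons, List.dropWhile_cons, if_pos h, if_pos h,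
        pvWords, if_pos h]
    cases hr : cs.dropWhile PySem.Chars.isalnum with
    | nil => simp [pvWords]
    | cons d r' =>
      have hd : PySem.Chars.isalnum d = false := by simpa using pv_dropWhile_head hr
      have hwdr : pvWords (d :: r') = pvWords r' := by rw [pvWords, if_neg (by simp [hd])]
      rw [hr] at ih
      rw [List.splitOnP_cons, if_pos (by simp [hd])] at ih
      simp only [List.filter_cons] at ih
      simp at ih
      rw [hwdr] at ih
      rw [List.filter_cons, if_pos (by simp), ih, hwdr]
  | case3 c cs h ih =>
    rw [List.splitOnP_cons, if_pos (by simp [h]), pvWords, if_neg h, ← ih]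
    simp

theorem pv_inter_last (ws : List (List Char))
    (hw : ∀ w ∈ ws, w ≠ [] ∧ ∀ ch ∈ w, PySem.Chars.isalnum ch = true) (hne : ws ≠ []) :
    ∃ x, (List.intercalate ['-'] ws).getLast? = some x ∧ PySem.Chars.isalnum x = true := by
  induction ws with
  | nil => exact absurd rfl hne
  | cons w ws ih =>
    cases ws with
    | nil =>
      obtain ⟨hwne, hall⟩ := hw w (by simp)
      cases hg : w.getLast? with
      | none => exact absurd (List.getLast?_eq_none_iff.mp hg) hwne
      | some x =>
        exact ⟨x, by simpa [List.intercalate] using hg, hall x (List.mem_of_getLast? hg)⟩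
    | cons w2 ws2 =>
      obtain ⟨x, hx, hax⟩ := ih (fun v hv => hw v (by simp [hv])) (by simp)
      refine ⟨x, ?_, hax⟩
      have h1 : List.intercalate ['-'] (w :: w2 :: ws2) =
          w ++ '-' :: List.intercalate ['-'] (w2 :: ws2) := by
        simp [List.intercalate, List.intersperse]
      rw [h1, List.getLast?_append]
      cases hI : List.intercalate ['-'] (w2 :: ws2) with
      | nil => rw [hI] at hx; simp at hx
      | cons y ys => rw [hI] at hx; rw [List.getLast?_cons_cons, hx]; simp

theorem pv_strip_eq (ws : List (List Char))
    (hw : ∀ w ∈ ws, w ≠ [] ∧ ∀ ch ∈ w, PySem.Chars.isalnum ch = true)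
    (td : List Char) (htd : td = [] ∨ (td = ['-'] ∧ ws ≠ [])) :
    PySem.Chars.stripChars (List.intercalate ['-'] ws ++ td) ['-'] =
      List.intercalate ['-'] ws := by
  cases ws with
  | nil =>
    rcases htd with rfl | ⟨_, hne⟩
    · simp [PySem.Chars.stripChars, List.intercalate]
    · exact absurd rfl hne
  | cons w ws' =>
    obtain ⟨hwne, hall⟩ := hw w (by simp)
    obtain ⟨h, w', rfl⟩ := List.exists_cons_of_ne_nil hwne
    have hh : PySem.Chars.isalnum h = true := hall h (by simp)
    have hhead : ∃ rest, List.intercalate ['-'] ((h :: w') :: ws') ++ td = h :: rest := by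
      cases ws' with
      | nil => exact ⟨w' ++ td, by simp [List.intercalate]⟩
      | cons w2 ws2 =>
        exact ⟨w' ++ '-' :: List.intercalate ['-'] (w2 :: ws2) ++ td,
          by simp [List.intercalate, List.intersperse]⟩
    obtain ⟨x, hx, hax⟩ := pv_inter_last _ hw (by simp)
    obtain ⟨rest, hrest⟩ := hhead
    have hcont : ∀ c : Char, (['-'].contains c) = (c == '-') := by
      intro c; simp only [List.contains_cons, List.contains_nil, Bool.or_false]
    unfold PySem.Chars.stripChars
    simp only [hcont]
    rw [hrest, List.dropWhile_cons, if_neg (by simp [pv_alnum_ne hh]), ← hrest]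
    have hdropI : List.dropWhile (fun c => c == '-')
        (List.intercalate ['-'] ((h :: w') :: ws')).reverse =
        (List.intercalate ['-'] ((h :: w') :: ws')).reverse := by
      cases hR : (List.intercalate ['-'] ((h :: w') :: ws')).reverse with
      | nil => rfl
      | cons y ys =>
        have : some y = some x := by
          rw [← hx, ← List.head?_reverse, hR]; rfl
        cases this
        rw [List.dropWhile_cons, if_neg (by simp [pv_alnum_ne hax])]
    rcases htd with rfl | ⟨rfl, _⟩
    · rw [List.append_nil, hdropI, List.reverse_reverse]
    · rw [List.reverse_append, show (['-'] : List Char).reverse = ['-'] from rfl,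
          List.singleton_append, List.dropWhile_cons, if_pos (by simp), hdropI,
          List.reverse_reverse]

-- ===== VERDICT (by name: the statement is the Claim_ definition above) =====
theorem slugify_branch_part_spec : Claim_equal_slugify_branch_part := by
  intro value _
  unfold Spec_slugify_branch_part
  have hA : PySem.Chars.stripChars
      ((PySem.Str.lower value).toList.foldl
        (fun acc ch =>
          if PySem.Chars.isalnum ch then acc ++ [ch]
          else if !acc.isEmpty && acc.getLast? != some '-' then acc ++ ['-'] else acc) []) ['-'] =
      List.intercalate ['-'] (pvWords (PySem.Str.lower value).toList) := by
    rw [pv_fold_eq]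
    rw [show (!List.isEmpty ([] : List Char)) = false from rfl,
        show ((([] : List Char).getLast?) == some '-') = false from rfl,
        List.nil_append, pvF_ff_eq]
    apply pv_strip_eq _ (pvWords_mem _)
    unfold pvTd
    split
    · left; rfl
    · next hne =>
      split
      · left; rfl
      · right; exact ⟨rfl, hne⟩
  have hB : PySem.Chars.join ['-']
      ((((PySem.Str.lower value).toList.map
          (fun ch => if PySem.Chars.isalnum ch then ch else '-')).splitOn '-').filter
        (fun p => !p.isEmpty)) =
      List.intercalate ['-'] (pvWords (PySem.Str.lower value).toList) := by
    rw [show ((PySem.Str.lower value).toList.map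
          (fun ch => if PySem.Chars.isalnum ch then ch else '-')).splitOn '-'
        = List.splitOnP (· == '-') ((PySem.Str.lower value).toList.map
          (fun ch => if PySem.Chars.isalnum ch then ch else '-')) by simp [List.splitOn]]
    rw [pv_map_split, pv_filter_split]
    simp [PySem.Chars.join]
  show slugify_branch_part value = slugify_branch_part_alt value
  unfold slugify_branch_part slugify_branch_part_alt
  simp only [hA, hB]
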